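-- pv_equiv track=rewrite | github.com/watsoncoders/ClashOfClansClone | Assests/localize_text/import/import_lang.py | find_last_not_of
-- ===== SOURCE A (Python) =====
-- def find_last_not_of(str_source, text):
--     source_len = len(str_source)
--     str_len = len(text)
--     if str_len > source_len:
--         return -1
--
--     i = source_len - 1
--     while i >= 0:
--         result = False
--         for k in range(0, str_len, 1):
--             if text[k] == str_source[i]:
--                 result = True
--                 break
--         if result:
--             i -= 1
--         else:
--             return i
--     return -1
-- ===== SOURCE B (Python) =====
-- def find_last_not_of(str_source, text):
--     if len(text) > len(str_source):
--         return -1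
--     chars = set(text)
--     last = -1
--     for i, c in enumerate(str_source):
--         if c not in chars:
--             last = i
--     return last
-- ===== Notes on version B (the rewrite author's own statement) =====
-- stated objective: faster
-- what changed: Replaces the backward while-loop with early return and a char-by-char inner membership scan by a single forward enumerate pass keeping a 'last non-member index' accumulator and a prebuilt set of text's characters.
import Mathlib
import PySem

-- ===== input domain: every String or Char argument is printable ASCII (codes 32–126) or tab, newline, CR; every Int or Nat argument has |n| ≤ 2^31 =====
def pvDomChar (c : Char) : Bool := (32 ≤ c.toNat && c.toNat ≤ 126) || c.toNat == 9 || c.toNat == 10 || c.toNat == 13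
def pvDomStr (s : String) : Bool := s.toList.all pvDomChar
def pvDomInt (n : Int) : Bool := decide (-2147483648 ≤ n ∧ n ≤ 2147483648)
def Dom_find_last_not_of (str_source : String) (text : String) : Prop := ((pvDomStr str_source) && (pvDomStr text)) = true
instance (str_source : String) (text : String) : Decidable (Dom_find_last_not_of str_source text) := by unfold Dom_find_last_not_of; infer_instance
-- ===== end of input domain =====

-- B replaces A's backward early-return scan (with an inner char-by-char membership loop)
-- by one forward pass keeping a 'last non-member index' accumulator against a set of text's chars.

-- ===== PORT A =====
-- inner 'for k in range(0, str_len, 1): if text[k] == str_source[i]: result = True; break'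
def pvAInner : List Char → Char → Bool
  | [], _ => false
  | k :: rest, c => if k == c then true else pvAInner rest c

-- outer 'while i >= 0' counting down; argument n is i + 1 (n = 0 means i < 0)
def pvALoop (src tx : List Char) : Nat → Int
  | 0 => -1
  | n + 1 => if pvAInner tx (src.getD n ' ') then pvALoop src tx n else (n : Int)

def find_last_not_of (str_source : String) (text : String) : Int :=
  let src := str_source.toList
  let tx := text.toList
  if tx.length > src.length then -1 else pvALoop src tx src.length

-- ===== PORT B =====
def find_last_not_of_alt (str_source : String) (text : String) : Int :=
  let src := str_source.toList
  let tx := text.toList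
  if tx.length > src.length then -1
  else
    let chars : PySem.Set Char := PySem.Set.ofList tx
    (PySem.List.enumerate src 0).foldl
      (fun last p => if PySem.Set.contains chars p.2 then last else p.1) (-1)

-- ===== PRECONDITION & SPEC =====
def Spec_find_last_not_of (str_source : String) (text : String) (out : Int) : Prop := out = find_last_not_of_alt str_source text
instance (str_source : String) (text : String) (out : Int) : Decidable (Spec_find_last_not_of str_source text out) := by unfold Spec_find_last_not_of; infer_instance

-- ===== CLAIM (what is proved, stated in full; the proofs are below) =====
def Claim_equal_find_last_not_of : Prop := ∀ (str_source : String) (text : String), Dom_find_last_not_of str_source text → Spec_find_last_not_of str_source text (find_last_not_of str_source text)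

-- ===== LEMMAS AND PROOFS =====

lemma pvAInner_eq_mem (tx : List Char) (c : Char) : pvAInner tx c = decide (c ∈ tx) := by
  induction tx with
  | nil => simp [pvAInner]
  | cons k rest ih =>
    by_cases hk : k = c
    · simp [pvAInner, hk]
    · simp [pvAInner, hk, ih]
      intro he; exact absurd he.symm hk

lemma pvALoop_eq_foldl (src tx : List Char) :
    ∀ n, n ≤ src.length →
      pvALoop src tx n =
        (PySem.List.enumerate (src.take n) 0).foldl
          (fun last p => if p.2 ∈ tx then last else p.1) (-1) := by
  intro n
  induction n with
  | zero => intro _; simp [pvALoop]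
  | succ m ih =>
    intro hle
    have hm : m < src.length := Nat.lt_of_succ_le hle
    have htake : src.take (m + 1) = src.take m ++ [src[m]] := by
      simp [List.take_succ (l := src) (i := m)]
    have hlen : (src.take m).length = m := List.length_take_of_le (Nat.le_of_lt hm)
    have hget : src.getD m ' ' = src[m] := List.getD_eq_getElem src ' ' hm
    rw [pvALoop, htake, PySem.List.enumerate_append, List.foldl_append, hlen,
        pvAInner_eq_mem, hget]
    by_cases hc : src[m] ∈ tx
    · simp [hc, ih (Nat.le_of_lt hm), PySem.List.enumerate]
    · simp [hc, PySem.List.enumerate]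

-- ===== VERDICT (by name: the statement is the Claim_ definition above) =====
theorem find_last_not_of_spec : Claim_equal_find_last_not_of := by
  intro s t _
  unfold Spec_find_last_not_of
  simp only [find_last_not_of, find_last_not_of_alt]
  by_cases h : t.toList.length > s.toList.length
  · rw [if_pos h, if_pos h]
  · rw [if_neg h, if_neg h,
        pvALoop_eq_foldl s.toList t.toList s.toList.length le_rfl, List.take_length]
    simp
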